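-- pv_equiv track=rewrite | github.com/yannickloth/W33-Theory | COMPLETE_BRACKET.py | intersection_product
-- ===== SOURCE A (Python) =====
-- def support(c):
--     return frozenset(i for i, x in enumerate(c) if x != 0)
--
-- def intersection_product(c1, c2):
--     """Product of values at intersection of supports."""
--     H1, H2 = support(c1), support(c2)
--     inter = H1 & H2
--     if not inter:
--         return 0
--     prod = 1
--     for i in inter:
--         if c1[i] != 0 and c2[i] != 0:
--             prod = (prod * c1[i] * c2[i]) % 3
--     return prod
-- ===== SOURCE B (Python) =====
-- def intersection_product(c1, c2):
--     """Product of values at intersection of supports."""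
--     prod = 1
--     found = False
--     for a, b in zip(c1, c2):
--         if a != 0 and b != 0:
--             found = True
--             prod = (prod * a * b) % 3
--     return prod if found else 0
-- ===== Notes on version B (the rewrite author's own statement) =====
-- stated objective: simpler
-- what changed: Single zip pass with a running product and a found flag replaces building two frozenset supports, intersecting them and indexing back into the lists.
import Mathlib
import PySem

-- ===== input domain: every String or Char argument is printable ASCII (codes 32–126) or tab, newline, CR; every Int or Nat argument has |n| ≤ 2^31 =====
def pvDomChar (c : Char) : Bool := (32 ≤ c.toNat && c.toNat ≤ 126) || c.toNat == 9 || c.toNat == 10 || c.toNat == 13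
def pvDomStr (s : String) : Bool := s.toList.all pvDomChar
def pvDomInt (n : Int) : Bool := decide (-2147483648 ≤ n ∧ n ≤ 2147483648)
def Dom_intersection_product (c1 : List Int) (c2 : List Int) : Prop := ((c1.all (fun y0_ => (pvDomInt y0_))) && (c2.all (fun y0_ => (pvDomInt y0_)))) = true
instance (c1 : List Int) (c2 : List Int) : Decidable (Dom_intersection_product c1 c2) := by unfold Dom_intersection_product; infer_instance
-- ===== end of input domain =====

-- B replaces A's build-two-supports / intersect / index-back structure by one zip pass with a
-- running product and a found flag (objective: simpler).

-- ===== PORT A =====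
-- support(c) = frozenset(i for i, x in enumerate(c) if x != 0)
def pv_support (c : List Int) : PySem.Set Int :=
  PySem.Set.ofList (((PySem.List.enumerate c).filter (fun p => p.2 != 0)).map (fun p => p.1))

-- Python iterates the frozenset `inter` in an unspecified order; the running mod-3 product is
-- order-independent, so iterating in PySem.Set.inter's (first set's) order is exact.
-- c1[i]/c2[i]: every i ∈ inter is in range for both lists, so pyGet? … |>.getD 0 is exact here.
def intersection_product (c1 : List Int) (c2 : List Int) : Int :=
  let H1 := pv_support c1
  let H2 := pv_support c2
  let inter := PySem.Set.inter H1 H2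
  if inter = [] then 0
  else inter.foldl (fun prod i =>
    if (PySem.List.pyGet? c1 i).getD 0 ≠ 0 ∧ (PySem.List.pyGet? c2 i).getD 0 ≠ 0 then
      PySem.Int.mod (prod * (PySem.List.pyGet? c1 i).getD 0 * (PySem.List.pyGet? c2 i).getD 0) 3
    else prod) 1

-- ===== PORT B =====
def intersection_product_alt (c1 : List Int) (c2 : List Int) : Int :=
  let r := (c1.zip c2).foldl (fun s ab =>
    if ab.1 ≠ 0 ∧ ab.2 ≠ 0 then (PySem.Int.mod (s.1 * ab.1 * ab.2) 3, true) else s)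
    ((1 : Int), false)
  if r.2 then r.1 else 0

-- ===== PRECONDITION & SPEC =====
def Spec_intersection_product (c1 : List Int) (c2 : List Int) (out : Int) : Prop := out = intersection_product_alt c1 c2
instance (c1 : List Int) (c2 : List Int) (out : Int) : Decidable (Spec_intersection_product c1 c2 out) := by unfold Spec_intersection_product; infer_instance

-- ===== CLAIM (what is proved, stated in full; the proofs are below) =====
def Claim_equal_intersection_product : Prop := ∀ (c1 : List Int) (c2 : List Int), Dom_intersection_product c1 c2 → Spec_intersection_product c1 c2 (intersection_product c1 c2)

-- ===== LEMMAS AND PROOFS =====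

-- support list from start index s (pv_support c = pvLFrom 0 c, since the list is nodup)
def pvLFrom (s : Int) (c : List Int) : List Int :=
  ((PySem.List.enumerate c s).filter (fun p => p.2 != 0)).map (fun p => p.1)

def pvPred (ab : Int × Int) : Bool := decide (ab.1 ≠ 0 ∧ ab.2 ≠ 0)

def pvMul (p : Int) (ab : Int × Int) : Int := PySem.Int.mod (p * ab.1 * ab.2) 3

lemma pvLFrom_nil (s : Int) : pvLFrom s [] = [] := by
  simp [pvLFrom, PySem.List.enumerate]

lemma pvLFrom_cons (s : Int) (a : Int) (c : List Int) :
    pvLFrom s (a :: c) = (if a ≠ 0 then [s] else []) ++ pvLFrom (s + 1) c := by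
  by_cases ha : a = 0 <;>
    simp [pvLFrom, PySem.List.enumerate_cons, ha]

lemma pvLFrom_lb {s i : Int} {c : List Int} (h : i ∈ pvLFrom s c) : s ≤ i := by
  simp only [pvLFrom, List.mem_map, List.mem_filter] at h
  obtain ⟨p, ⟨hp, _⟩, rfl⟩ := h
  rw [PySem.List.mem_enumerate_iff] at hp
  obtain ⟨k, hk, rfl⟩ := hp
  simp

lemma pvLFrom_nodup (s : Int) (c : List Int) : (pvLFrom s c).Nodup := by
  have h := PySem.List.pairwise_lt_enumerate c s
  have h2 := h.filter (fun p => p.2 != 0)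
  have h3 : (((PySem.List.enumerate c s).filter (fun p => p.2 != 0)).map
      (fun p => p.1)).Pairwise (fun a b => a < b) := by
    refine List.Pairwise.map _ ?_ h2
    intro p q hpq
    exact hpq
  exact h3.imp (fun {a b} hab => ne_of_lt hab)

-- the crux: mapping get-pairs over the support intersection gives the filtered zip
lemma pvKey : ∀ (c1 c2 : List Int) (s : Int) (f g : Int → Int),
    (∀ k (h : k < c1.length), f (s + k) = c1[k]) →
    (∀ k (h : k < c2.length), g (s + k) = c2[k]) →
    ((pvLFrom s c1).filter (fun i => (pvLFrom s c2).contains i)).map (fun i => (f i, g i))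
      = (c1.zip c2).filter pvPred := by
  intro c1
  induction c1 with
  | nil => intro c2 s f g _ _; simp [pvLFrom_nil]
  | cons a t1 ih =>
    intro c2 s f g hf hg
    cases c2 with
    | nil => simp [pvLFrom_nil, pvLFrom_cons]
    | cons b t2 =>
      have hs1 : ∀ i ∈ pvLFrom (s + 1) t1,
          ((pvLFrom s (b :: t2)).contains i) = ((pvLFrom (s + 1) t2).contains i) := by
        intro i hi
        have : s + 1 ≤ i := pvLFrom_lb hi
        by_cases hb : b = 0 <;>
          (simp [pvLFrom_cons, hb, List.contains_eq_mem]; try omega)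
      have htail :
          ((pvLFrom (s + 1) t1).filter (fun i => (pvLFrom s (b :: t2)).contains i)).map
              (fun i => (f i, g i)) = (t1.zip t2).filter pvPred := by
        rw [List.filter_congr hs1]
        exact ih t2 (s + 1) f g
          (by intro k hk
              have := hf (k + 1) (by simpa using Nat.succ_lt_succ hk)
              simpa [add_assoc, add_comm, add_left_comm] using this)
          (by intro k hk
              have := hg (k + 1) (by simpa using Nat.succ_lt_succ hk)
              simpa [add_assoc, add_comm, add_left_comm] using this)
      have hfs : f s = a := by have := hf 0 (by simp); simpa using this
      have hgs : g s = b := by have := hg 0 (by simp); simpa using this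
      have hnot : s ∉ pvLFrom (s + 1) t2 := fun h => absurd (pvLFrom_lb h) (by omega)
      have hsmem : s ∈ pvLFrom s (b :: t2) ↔ b ≠ 0 := by
        by_cases hb : b = 0
        · simp [pvLFrom_cons, hb, hnot]
        · simp [pvLFrom_cons, hb, hnot]
      have hhead : (((if a ≠ 0 then [s] else []).filter
            (fun i => (pvLFrom s (b :: t2)).contains i)).map (fun i => (f i, g i)))
          = if pvPred (a, b) then [(a, b)] else [] := by
        by_cases ha : a = 0
        · simp [ha, pvPred]
        · rw [if_pos ha, List.filter_cons]
          by_cases hb : b = 0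
          · subst hb
            have hns : s ∉ pvLFrom s ((0 : Int) :: t2) := fun h => (hsmem.1 h) rfl
            simp [List.contains_eq_mem, hns, pvPred, ha]
          · simp [List.contains_eq_mem, hsmem, hb, pvPred, ha, hfs, hgs]
      rw [pvLFrom_cons s a t1, List.filter_append, List.map_append, hhead, htail,
        List.zip_cons_cons, List.filter_cons]
      by_cases hp : pvPred (a, b) = true
      · rw [if_pos hp, if_pos hp]; rfl
      · rw [if_neg hp, if_neg hp]; rfl

lemma pv_support_eq (c : List Int) : pv_support c = pvLFrom 0 c := by
  unfold pv_support pvLFrom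
  exact PySem.Set.ofList_eq_self_of_nodup _ (pvLFrom_nodup 0 c)

-- B's fold characterised by the filtered zip
lemma pvB_fold : ∀ (l : List (Int × Int)) (p : Int) (b : Bool),
    l.foldl (fun s ab =>
      if ab.1 ≠ 0 ∧ ab.2 ≠ 0 then (PySem.Int.mod (s.1 * ab.1 * ab.2) 3, true) else s) (p, b)
    = ((l.filter pvPred).foldl pvMul p, b || !(l.filter pvPred).isEmpty) := by
  intro l
  induction l with
  | nil => simp
  | cons ab t ih =>
    intro p b
    by_cases h : ab.1 ≠ 0 ∧ ab.2 ≠ 0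
    · rw [List.foldl_cons, if_pos h, ih, List.filter_cons,
        if_pos (show pvPred ab = true by simpa [pvPred] using h)]
      simp [pvMul]
    · rw [List.foldl_cons, if_neg h, ih, List.filter_cons,
        if_neg (show ¬ pvPred ab = true by simpa [pvPred] using h)]

lemma pvB_char (c1 c2 : List Int) :
    intersection_product_alt c1 c2 =
      if (c1.zip c2).filter pvPred = [] then 0
      else ((c1.zip c2).filter pvPred).foldl pvMul 1 := by
  unfold intersection_product_alt
  rw [pvB_fold]
  by_cases h : (c1.zip c2).filter pvPred = [] <;> simp [h]

lemma pvA_char (c1 c2 : List Int) :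
    intersection_product c1 c2 =
      if (c1.zip c2).filter pvPred = [] then 0
      else ((c1.zip c2).filter pvPred).foldl pvMul 1 := by
  have hf : ∀ k (h : k < c1.length),
      ((PySem.List.pyGet? c1 ((0 : Int) + k)).getD 0) = c1[k] := by
    intro k hk
    rw [zero_add, PySem.List.pyGet?_natCast]
    simp [List.getElem?_eq_getElem hk]
  have hg : ∀ k (h : k < c2.length),
      ((PySem.List.pyGet? c2 ((0 : Int) + k)).getD 0) = c2[k] := by
    intro k hk
    rw [zero_add, PySem.List.pyGet?_natCast]
    simp [List.getElem?_eq_getElem hk]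
  have hkey := pvKey c1 c2 0
    (fun i => (PySem.List.pyGet? c1 i).getD 0) (fun i => (PySem.List.pyGet? c2 i).getD 0) hf hg
  unfold intersection_product
  simp only [pv_support_eq, PySem.Set.inter]
  set inter := (pvLFrom 0 c1).filter (fun i => PySem.Set.contains (pvLFrom 0 c2) i) with hinter
  have hinter2 : inter = (pvLFrom 0 c1).filter (fun i => (pvLFrom 0 c2).contains i) := by
    rw [hinter]; exact List.filter_congr (by intro i _; simp [PySem.Set.contains_eq_listContains])
  have hmap : inter.map (fun i => ((PySem.List.pyGet? c1 i).getD 0, (PySem.List.pyGet? c2 i).getD 0))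
      = (c1.zip c2).filter pvPred := by rw [hinter2]; exact hkey
  have hempty : (inter = []) ↔ ((c1.zip c2).filter pvPred = []) := by
    rw [← hmap]; simp
  by_cases h : inter = []
  · simp only [h, ← hempty.mp h]
    simp
  · rw [if_neg h, if_neg (fun hc => h (hempty.mpr hc))]
    have hfold : inter.foldl (fun prod i =>
        if (PySem.List.pyGet? c1 i).getD 0 ≠ 0 ∧ (PySem.List.pyGet? c2 i).getD 0 ≠ 0 then
          PySem.Int.mod (prod * (PySem.List.pyGet? c1 i).getD 0 * (PySem.List.pyGet? c2 i).getD 0) 3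
        else prod) 1
        = (inter.map (fun i => ((PySem.List.pyGet? c1 i).getD 0, (PySem.List.pyGet? c2 i).getD 0))).foldl
            (fun p ab => if ab.1 ≠ 0 ∧ ab.2 ≠ 0 then PySem.Int.mod (p * ab.1 * ab.2) 3 else p) 1 := by
      rw [List.foldl_map]
    rw [hfold, hmap]
    refine PySem.List.foldl_congr_mem _ _ _ _ ?_
    intro acc x hx
    have hpx : pvPred x = true := List.of_mem_filter hx
    simp only [pvPred, decide_eq_true_eq] at hpx
    simp [pvMul, hpx]

-- ===== VERDICT (by name: the statement is the Claim_ definition above) =====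
theorem intersection_product_spec : Claim_equal_intersection_product := by
  intro c1 c2 _
  unfold Spec_intersection_product
  rw [pvA_char, pvB_char]
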